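-- pv_equiv track=rewrite | github.com/tldr-group/HR-Dv2 | dv2/high_res.py | compute_shift_directions
-- ===== SOURCE A (Python) =====
-- from typing import List, Literal, TypeAlias, Tuple
--
-- Neighbourhood: TypeAlias = Literal["Neumann", "Moore"]
--
-- def compute_shift_directions(pattern: Neighbourhood) -> List[Tuple[int, int]]:
--     # Precompute neighbourhood shift unit vectors
--     shifts = [  # shifts in yx format
--         (-1, -1),
--         (-1, 0),
--         (-1, 1),
--         (0, -1),
--         (0, 0),
--         (0, 1),
--         (1, -1),
--         (1, 0),
--         (1, 1),
--     ]
--     shift_directions: List[Tuple[int, int]] = []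
--     for i in range(9):
--         if pattern == "Neumann" and i % 2 == 1:
--             shift_directions.append(shifts[i])
--         elif pattern == "Moore" and i != 4:
--             shift_directions.append(shifts[i])
--     return shift_directions
-- ===== SOURCE B (Python) =====
-- from typing import List, Tuple
--
-- def compute_shift_directions(pattern) -> List[Tuple[int, int]]:
--     # Direct dispatch: each neighbourhood is a fixed constant list; no loop or filtering.
--     if pattern == "Neumann":
--         return [(-1, 0), (0, -1), (0, 1), (1, 0)]
--     if pattern == "Moore":
--         return [(-1, -1), (-1, 0), (-1, 1), (0, -1), (0, 1), (1, -1), (1, 0), (1, 1)]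
--     return []
-- ===== Notes on version B (the rewrite author's own statement) =====
-- stated objective: simpler
-- what changed: Removed the loop over a 9-entry shift table with per-index filter tests; B is a straight-line dispatch returning each neighbourhood as an explicit literal list (empty for unknown patterns).
import Mathlib
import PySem

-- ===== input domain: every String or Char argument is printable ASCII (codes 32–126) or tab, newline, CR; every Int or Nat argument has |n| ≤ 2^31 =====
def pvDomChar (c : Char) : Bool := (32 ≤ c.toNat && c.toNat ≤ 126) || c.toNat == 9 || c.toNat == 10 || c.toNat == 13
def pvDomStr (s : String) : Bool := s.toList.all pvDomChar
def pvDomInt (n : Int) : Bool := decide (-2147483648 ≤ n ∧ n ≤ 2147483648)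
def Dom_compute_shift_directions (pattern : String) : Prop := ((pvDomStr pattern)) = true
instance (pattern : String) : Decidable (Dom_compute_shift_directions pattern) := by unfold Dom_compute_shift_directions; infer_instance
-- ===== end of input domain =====

-- B replaces A's loop over a precomputed shift table with a straight-line dispatch to literal lists; objective: simpler.

-- ===== PORT A =====
def pvShiftsA : List (Int × Int) :=
  [(-1, -1), (-1, 0), (-1, 1), (0, -1), (0, 0), (0, 1), (1, -1), (1, 0), (1, 1)]

def compute_shift_directions (pattern : String) : List (Int × Int) :=
  (PySem.List.pyRange 0 9 1).foldl (fun acc i =>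
    if pattern = "Neumann" ∧ PySem.Int.mod i 2 = 1 then
      match PySem.List.pyGet? pvShiftsA i with
      | some v => acc ++ [v]
      | none => acc
    else if pattern = "Moore" ∧ i ≠ 4 then
      match PySem.List.pyGet? pvShiftsA i with
      | some v => acc ++ [v]
      | none => acc
    else acc) []

-- ===== PORT B =====
def compute_shift_directions_alt (pattern : String) : List (Int × Int) :=
  if pattern = "Neumann" then [(-1, 0), (0, -1), (0, 1), (1, 0)]
  else if pattern = "Moore" then
    [(-1, -1), (-1, 0), (-1, 1), (0, -1), (0, 1), (1, -1), (1, 0), (1, 1)]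
  else []

-- ===== PRECONDITION & SPEC =====
def Spec_compute_shift_directions (pattern : String) (out : List (Int × Int)) : Prop := out = compute_shift_directions_alt pattern
instance (pattern : String) (out : List (Int × Int)) : Decidable (Spec_compute_shift_directions pattern out) := by unfold Spec_compute_shift_directions; infer_instance

-- ===== CLAIM =====
def Claim_equal_compute_shift_directions : Prop := ∀ (pattern : String), Dom_compute_shift_directions pattern → Spec_compute_shift_directions pattern (compute_shift_directions pattern)

-- ===== LEMMAS AND PROOFS =====
theorem pvRange9 : PySem.List.pyRange 0 9 1 = [0, 1, 2, 3, 4, 5, 6, 7, 8] := by decide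

-- ===== VERDICT =====
theorem compute_shift_directions_spec : Claim_equal_compute_shift_directions := by
  intro pattern _
  unfold Spec_compute_shift_directions
  by_cases hN : pattern = "Neumann"
  · subst hN; decide
  · by_cases hM : pattern = "Moore"
    · subst hM; decide
    · simp [compute_shift_directions, compute_shift_directions_alt, pvRange9, hN, hM,
        List.foldl]
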